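-- pv_equiv track=rewrite | github.com/Joowon0/AlgorithmExercises | neighbors.py | dictReverse
-- ===== SOURCE A (Python) =====
-- def dictReverse(myDict) :
--     rev = {}
--     for k, v in myDict.items():
--         if v in rev :
--             (x,y) = rev[v]
--             if k[1] < y:
--                 rev[v] = k
--             elif k[1] == y and k[0] < x:
--                 rev[v] = k
--         else :
--             rev[v] = k
--     return rev
-- ===== SOURCE B (Python) =====
-- def dictReverse(myDict):
--     groups = {}
--     for k, v in myDict.items():
--         groups.setdefault(v, []).append(k)
--     return {v: min(ks, key=lambda k: (k[1], k[0])) for v, ks in groups.items()}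
-- ===== Notes on version B (the rewrite author's own statement) =====
-- stated objective: alternative
-- what changed: B replaces A's online per-item comparison chain against the stored winner with a group-then-reduce pass: it first groups all keys by value into lists, then takes the (k[1],k[0])-lexicographic minimum of each group with min(..., key=...).
import Mathlib
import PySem

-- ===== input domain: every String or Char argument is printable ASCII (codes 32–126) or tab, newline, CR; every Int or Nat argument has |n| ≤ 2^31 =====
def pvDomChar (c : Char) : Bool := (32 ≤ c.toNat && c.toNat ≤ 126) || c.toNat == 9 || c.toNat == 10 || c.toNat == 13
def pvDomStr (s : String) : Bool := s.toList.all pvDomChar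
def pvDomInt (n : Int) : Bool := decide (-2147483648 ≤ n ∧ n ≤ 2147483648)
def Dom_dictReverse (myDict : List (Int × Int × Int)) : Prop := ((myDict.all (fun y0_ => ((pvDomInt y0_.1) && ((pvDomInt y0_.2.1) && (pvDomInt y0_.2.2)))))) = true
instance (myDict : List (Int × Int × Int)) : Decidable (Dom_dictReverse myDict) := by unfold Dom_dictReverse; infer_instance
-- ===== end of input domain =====

-- B replaces A's online comparison chain with group-by-value then a per-group lexicographic minimum (objective: alternative decomposition, same cost).
-- An input item (k0, k1, v) is the dict entry (k0, k1) ↦ v; the result maps v ↦ (k0, k1).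

-- ===== PORT A =====
-- loop body of A's for-loop: keep the stored key unless the new one wins on (k[1], k[0])
def pvStepA (rev : PySem.Dict Int (Int × Int)) (e : Int × Int × Int) : PySem.Dict Int (Int × Int) :=
  match rev.get? e.2.2 with
  | some m =>
    if e.2.1 < m.2 then rev.insert e.2.2 (e.1, e.2.1)
    else if e.2.1 == m.2 && e.1 < m.1 then rev.insert e.2.2 (e.1, e.2.1)
    else rev
  | none => rev.insert e.2.2 (e.1, e.2.1)

def dictReverse (myDict : List (Int × Int × Int)) : List (Int × Int × Int) :=
  (myDict.foldl pvStepA PySem.Dict.empty).items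

-- ===== PORT B =====
-- min(ks, key=lambda k: (k[1], k[0])): first minimum under the lexicographic tuple order
def pvMinKey (ks : List (Int × Int)) : Int × Int :=
  match PySem.List.min2? ks (fun k => k.2) (fun k => k.1) with
  | some m => m
  | none => (0, 0)   -- unreachable: every group built below is nonempty

-- groups.setdefault(v, []).append(k)
def pvStepG (g : PySem.Dict Int (List (Int × Int))) (e : Int × Int × Int) :
    PySem.Dict Int (List (Int × Int)) :=
  g.insert e.2.2 (g.getD e.2.2 [] ++ [(e.1, e.2.1)])

def dictReverse_alt (myDict : List (Int × Int × Int)) : List (Int × Int × Int) :=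
  ((myDict.foldl pvStepG PySem.Dict.empty).items).map (fun p => (p.1, pvMinKey p.2))

-- ===== PRECONDITION & SPEC =====
def Spec_dictReverse (myDict : List (Int × Int × Int)) (out : List (Int × Int × Int)) : Prop := out = dictReverse_alt myDict
instance (myDict : List (Int × Int × Int)) (out : List (Int × Int × Int)) : Decidable (Spec_dictReverse myDict out) := by unfold Spec_dictReverse; infer_instance

-- ===== CLAIM (what is proved, stated in full; the proofs are below) =====
def Claim_equal_dictReverse : Prop := ∀ (myDict : List (Int × Int × Int)), Dom_dictReverse myDict → Spec_dictReverse myDict (dictReverse myDict)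

-- ===== LEMMAS AND PROOFS =====

-- two dicts with the same item list are equal
theorem pvDictExt {κ ν : Type} (d d' : PySem.Dict κ ν) (h : d.items = d'.items) : d = d' := by
  cases d; cases d'; cases h; rfl

-- per-entry image: a group (v, ks) becomes A's stored entry (v, min of ks)
def pvF (p : Int × List (Int × Int)) : Int × Int × Int := (p.1, pvMinKey p.2)

def pvMap (g : PySem.Dict Int (List (Int × Int))) : PySem.Dict Int (Int × Int) :=
  ⟨g.items.map pvF⟩

-- invariant of the grouping fold: keys are distinct and every group is nonempty
def pvInv (g : PySem.Dict Int (List (Int × Int))) : Prop :=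
  g.keys.Nodup ∧ ∀ p ∈ g.items, p.2 ≠ ([] : List (Int × Int))

theorem pvGet?_pvMap (g : PySem.Dict Int (List (Int × Int))) (v : Int) :
    (pvMap g).get? v = (g.get? v).map pvMinKey := by
  show Option.map (fun x => x.2) (List.find? (fun p => p.1 == v) (g.items.map pvF))
      = Option.map pvMinKey (Option.map (fun x => x.2) (List.find? (fun p => p.1 == v) g.items))
  rw [List.find?_map]
  rw [show ((fun p : Int × Int × Int => p.1 == v) ∘ pvF)
      = (fun p : Int × List (Int × Int) => p.1 == v) from funext fun p => rfl]
  cases List.find? (fun p => p.1 == v) g.items <;> rfl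

theorem pvContains_pvMap (g : PySem.Dict Int (List (Int × Int))) (v : Int) :
    (pvMap g).contains v = g.contains v := by
  show (g.items.map pvF).any (fun p => p.1 == v) = g.items.any (fun p => p.1 == v)
  rw [List.any_map]
  rfl

-- the fold step of PySem.List.min2? with keys (·.2) and (·.1)
def pvMStep (acc : Option (Int × Int)) (x : Int × Int) : Option (Int × Int) :=
  match acc with
  | none => some x
  | some m =>
    if (decide (x.2 < m.2) || !decide (m.2 < x.2) && decide (x.1 < m.1)) = true
    then some x else some m

theorem pvMin2?_eq_foldl (ks : List (Int × Int)) :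
    PySem.List.min2? ks (fun k => k.2) (fun k => k.1) = ks.foldl pvMStep none := by
  unfold PySem.List.min2?
  congr 1
  funext acc x
  cases acc <;> rfl

theorem pvMStep_foldl_some (t : List (Int × Int)) (m : Int × Int) :
    ∃ m', t.foldl pvMStep (some m) = some m' := by
  induction t generalizing m with
  | nil => exact ⟨m, rfl⟩
  | cons a t ih =>
    simp only [List.foldl_cons, pvMStep]
    split <;> exact ih _

theorem pvMinKey_eq_some {ks : List (Int × Int)} {m : Int × Int}
    (h : PySem.List.min2? ks (fun k => k.2) (fun k => k.1) = some m) : pvMinKey ks = m := by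
  simp [pvMinKey, h]

theorem pvMinKey_append (a : Int × Int) (t : List (Int × Int)) (k : Int × Int) :
    pvMinKey ((a :: t) ++ [k]) =
      (if k.2 < (pvMinKey (a :: t)).2 then k
       else if k.2 == (pvMinKey (a :: t)).2 && k.1 < (pvMinKey (a :: t)).1 then k
       else pvMinKey (a :: t)) := by
  obtain ⟨m, hm⟩ := pvMStep_foldl_some t a
  have h1 : PySem.List.min2? (a :: t) (fun k => k.2) (fun k => k.1) = some m := by
    rw [pvMin2?_eq_foldl, List.foldl_cons]; exact hm
  have h2 : PySem.List.min2? ((a :: t) ++ [k]) (fun k => k.2) (fun k => k.1)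
      = pvMStep (some m) k := by
    rw [pvMin2?_eq_foldl, List.foldl_append, ← pvMin2?_eq_foldl, h1]
    rfl
  rw [pvMinKey_eq_some h1]
  by_cases hlt : k.2 < m.2
  · have hstep : pvMStep (some m) k = some k := by simp [pvMStep, hlt]
    rw [pvMinKey_eq_some (h2.trans hstep)]
    simp [hlt]
  · by_cases hgt : m.2 < k.2
    · have hstep : pvMStep (some m) k = some m := by simp [pvMStep, hlt, hgt]
      rw [pvMinKey_eq_some (h2.trans hstep)]
      have hne : ¬ (k.2 = m.2) := by omega
      simp [hlt, hne]
    · have heq : k.2 = m.2 := by omega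
      by_cases h4 : k.1 < m.1
      · have hstep : pvMStep (some m) k = some k := by simp [pvMStep, hlt, hgt, h4]
        rw [pvMinKey_eq_some (h2.trans hstep)]
        simp [heq, h4]
      · have hstep : pvMStep (some m) k = some m := by simp [pvMStep, hlt, hgt, h4]
        rw [pvMinKey_eq_some (h2.trans hstep)]
        simp [heq, h4]

-- with distinct keys, the looked-up binding is the only one with that key
theorem pvFirst_match (g : PySem.Dict Int (List (Int × Int))) (v : Int)
    (ks : List (Int × Int)) (hnd : g.keys.Nodup) (hget : g.get? v = some ks) :
    ∀ p ∈ g.items, p.1 = v → p = (v, ks) := by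
  obtain ⟨l⟩ := g
  simp only [PySem.Dict.get?, PySem.Dict.keys] at hnd hget ⊢
  revert hnd hget
  induction l with
  | nil => intro _ hget; simp at hget
  | cons a t ih =>
    intro hnd hget p hp hpv
    simp only [List.map_cons, List.nodup_cons] at hnd
    rcases List.mem_cons.mp hp with rfl | hp
    · have hpos : (fun q : Int × List (Int × Int) => q.1 == v) p = true := by simp [hpv]
      rw [@List.find?_cons_of_pos _ (fun q : Int × List (Int × Int) => q.1 == v) p t hpos] at hget
      simp only [Option.map_some, Option.some.injEq] at hget
      exact Prod.ext hpv hget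
    · have hav : ¬ (a.1 = v) := fun hav =>
        hnd.1 (hav ▸ hpv ▸ (List.mem_map_of_mem (f := fun x => x.1) hp))
      rw [List.find?_cons_of_neg (by simp [hav])] at hget
      exact ih hnd.2 hget p hp hpv

theorem pvContains_of_get? (g : PySem.Dict Int (List (Int × Int))) (v : Int)
    (ks : List (Int × Int)) (hget : g.get? v = some ks) : g.contains v = true := by
  cases hcv : g.contains v with
  | false =>
    rw [(PySem.Dict.get?_eq_none_iff_contains g v).2 hcv] at hget
    exact absurd hget (by simp)
  | true => rfl

-- one pointwise step of the overwrite/regroup commutation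
theorem pvPointwise (v k0 k1 : Int) (ks' : List (Int × Int))
    (hks' : pvMinKey ks' = (k0, k1)) (p : Int × List (Int × Int)) :
    (fun q : Int × Int × Int => if (q.1 == v) = true then (v, (k0, k1)) else q) (pvF p)
      = pvF (if (p.1 == v) = true then (v, ks') else p) := by
  by_cases hpv : (p.1 == v) = true
  · simp [pvF, hpv, hks']
  · simp [pvF, hpv]

theorem pvStep_comm (g : PySem.Dict Int (List (Int × Int))) (e : Int × Int × Int)
    (hinv : pvInv g) : pvStepA (pvMap g) e = pvMap (pvStepG g e) := by
  obtain ⟨k0, k1, v⟩ := e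
  unfold pvStepA pvStepG
  simp only [pvGet?_pvMap]
  cases hget : g.get? v with
  | none =>
    have hc : g.contains v = false := (PySem.Dict.get?_eq_none_iff_contains g v).1 hget
    have hc' : (pvMap g).contains v = false := by rw [pvContains_pvMap]; exact hc
    have hgd : g.getD v [] = [] := by simp [PySem.Dict.getD, hget]
    simp only [Option.map_none, hgd, List.nil_append]
    apply pvDictExt
    rw [show ((pvMap g).insert v (k0, k1)).items = (pvMap g).items ++ [(v, (k0, k1))] from
          PySem.Dict.items_insert_of_not_contains _ _ hc',
        show (pvMap (g.insert v [(k0, k1)])).items = (g.items ++ [(v, [(k0, k1)])]).map pvF from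
          congrArg (List.map pvF) (PySem.Dict.items_insert_of_not_contains _ _ hc)]
    simp [pvMap, pvF, pvMinKey, pvMin2?_eq_foldl, pvMStep]
  | some ks =>
    have hmem : (v, ks) ∈ g.items := PySem.Dict.mem_items_of_get?_eq_some g hget
    have hks : ks ≠ [] := hinv.2 _ hmem
    obtain ⟨a, t, rfl⟩ : ∃ a t, ks = a :: t := by
      cases ks with
      | nil => exact absurd rfl hks
      | cons a t => exact ⟨a, t, rfl⟩
    have hc : g.contains v = true := pvContains_of_get? g v _ hget
    have hc' : (pvMap g).contains v = true := by rw [pvContains_pvMap]; exact hc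
    have hgd : g.getD v [] = a :: t := by simp [PySem.Dict.getD, hget]
    have hmin := pvMinKey_append a t (k0, k1)
    simp only [Option.map_some, hgd]
    have hrhs : (pvMap (g.insert v ((a :: t) ++ [(k0, k1)]))).items
        = g.items.map (fun p => pvF (if (p.1 == v) = true then (v, (a :: t) ++ [(k0, k1)]) else p)) := by
      show (g.insert v ((a :: t) ++ [(k0, k1)])).items.map pvF = _
      rw [PySem.Dict.items_insert_of_contains _ _ hc, List.map_map]
      rfl
    have hlhsI : ((pvMap g).insert v (k0, k1)).items
        = g.items.map (fun p => (fun q : Int × Int × Int =>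
            if (q.1 == v) = true then (v, (k0, k1)) else q) (pvF p)) := by
      rw [PySem.Dict.items_insert_of_contains _ _ hc']
      show ((g.items.map pvF).map _) = _
      rw [List.map_map]
      rfl
    by_cases h1 : k1 < (pvMinKey (a :: t)).2
    · have hval : pvMinKey ((a :: t) ++ [(k0, k1)]) = (k0, k1) := by rw [hmin]; simp [h1]
      rw [if_pos h1]
      exact pvDictExt _ _ (by
        rw [hlhsI, hrhs]
        exact List.map_congr_left fun p _ => pvPointwise v k0 k1 _ hval p)
    · by_cases h2 : (k1 == (pvMinKey (a :: t)).2 && decide (k0 < (pvMinKey (a :: t)).1)) = true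
      · have hval : pvMinKey ((a :: t) ++ [(k0, k1)]) = (k0, k1) := by
          rw [hmin]; simp only [Bool.and_eq_true, beq_iff_eq, decide_eq_true_eq] at h2 ⊢
          simp [h2.1, h2.2]
        rw [if_neg h1, if_pos h2]
        exact pvDictExt _ _ (by
          rw [hlhsI, hrhs]
          exact List.map_congr_left fun p _ => pvPointwise v k0 k1 _ hval p)
      · have hval : pvMinKey ((a :: t) ++ [(k0, k1)]) = pvMinKey (a :: t) := by
          rw [hmin]; simp only [Bool.and_eq_true, beq_iff_eq, decide_eq_true_eq] at h2 ⊢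
          by_cases heq : k1 = (pvMinKey (a :: t)).2
          · have : ¬ k0 < (pvMinKey (a :: t)).1 := fun hk => h2 ⟨heq, hk⟩
            simp [heq, this]
          · simp [h1, heq]
        rw [if_neg h1, if_neg h2]
        refine pvDictExt _ _ ?_
        rw [hrhs]
        show g.items.map pvF = _
        refine List.map_congr_left fun p hp => ?_
        by_cases hpv : (p.1 == v) = true
        · rw [if_pos hpv, pvFirst_match g v (a :: t) hinv.1 hget p hp (by simpa using hpv)]
          show pvF (v, a :: t) = pvF (v, (a :: t) ++ [(k0, k1)])
          simp only [pvF]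
          rw [hval]
        · rw [if_neg hpv]

theorem pvInv_step (g : PySem.Dict Int (List (Int × Int))) (e : Int × Int × Int)
    (h : pvInv g) : pvInv (pvStepG g e) := by
  refine ⟨PySem.Dict.nodup_keys_insert _ _ _ h.1, fun p hp => ?_⟩
  simp only [pvStepG] at hp
  rw [PySem.Dict.mem_items_insert] at hp
  rcases hp with rfl | ⟨hp, -⟩
  · simp
  · exact h.2 p hp

-- main loop invariant: A's fold is the pvF-image of B's grouping fold
theorem pvMain (l : List (Int × Int × Int)) (g : PySem.Dict Int (List (Int × Int)))
    (hinv : pvInv g) : l.foldl pvStepA (pvMap g) = pvMap (l.foldl pvStepG g) := by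
  induction l generalizing g with
  | nil => rfl
  | cons e t ih =>
    simp only [List.foldl_cons]
    rw [pvStep_comm g e hinv]
    exact ih _ (pvInv_step g e hinv)

-- ===== VERDICT (by name: the statement is the Claim_ definition above) =====
theorem dictReverse_spec : Claim_equal_dictReverse := by
  intro myDict _
  show dictReverse myDict = dictReverse_alt myDict
  unfold dictReverse dictReverse_alt
  rw [show (PySem.Dict.empty : PySem.Dict Int (Int × Int)) = pvMap PySem.Dict.empty from rfl,
      pvMain myDict PySem.Dict.empty ⟨by simp [PySem.Dict.keys, PySem.Dict.empty],
        by simp [PySem.Dict.empty]⟩]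
  rfl
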